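-- pv_equiv track=rewrite | github.com/tfcp68/manual-projects | Исходники/Глава 2. Часть 1/Динамическое программирование1/Динамическое программирование1/Табличный метод/28. Макс. сумма меньше М/Python/max_sum.py | max_sum_dp
-- ===== SOURCE A (Python) =====
-- def max_sum_dp(arr: list, m: int):
--     n = len(arr)
--     need_sum = -1
--     prefix_arr = [0] * len(arr)
--     prefix_arr[0] = arr[0]
--     for k in range(1, len(arr)):
--         prefix_arr[k] = prefix_arr[k - 1] + arr[k]
--     for i in range(0, n):
--         for j in range(0, i + 1):
--             temp_sum = prefix_arr[i] - prefix_arr[j] + arr[j]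
--             if need_sum < temp_sum <= m:
--                 need_sum = temp_sum
--     return need_sum
-- ===== SOURCE B (Python) =====
-- def max_sum_dp(arr: list, m: int):
--     # Prefix sums + a sorted list of earlier prefixes, binary-searched:
--     # for each prefix p, the best subarray ending here with sum <= m is
--     # p - (smallest earlier prefix >= p - m).
--     best = -1
--     p = 0
--     sp = [0]  # sorted earlier prefix sums
--     for x in arr:
--         p += x
--         lo, hi = 0, len(sp)
--         while lo < hi:  # first index with sp[idx] >= p - m
--             mid = (lo + hi) // 2
--             if sp[mid] < p - m:
--                 lo = mid + 1
--             else: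
--                 hi = mid
--         if lo < len(sp):
--             cand = p - sp[lo]
--             if cand > best:
--                 best = cand
--         lo, hi = 0, len(sp)
--         while lo < hi:  # insertion point keeping sp sorted
--             mid = (lo + hi) // 2
--             if sp[mid] < p:
--                 lo = mid + 1
--             else:
--                 hi = mid
--         sp.insert(lo, p)
--     return best
-- ===== Notes on version B (the rewrite author's own statement) =====
-- stated objective: faster
-- what changed: Replaces A's O(n^2) scan over all (i,j) pairs of a prefix array by a single pass that keeps earlier prefix sums in a sorted list and binary-searches, for each new prefix p, the smallest earlier prefix >= p - m.
import Mathlib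
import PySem

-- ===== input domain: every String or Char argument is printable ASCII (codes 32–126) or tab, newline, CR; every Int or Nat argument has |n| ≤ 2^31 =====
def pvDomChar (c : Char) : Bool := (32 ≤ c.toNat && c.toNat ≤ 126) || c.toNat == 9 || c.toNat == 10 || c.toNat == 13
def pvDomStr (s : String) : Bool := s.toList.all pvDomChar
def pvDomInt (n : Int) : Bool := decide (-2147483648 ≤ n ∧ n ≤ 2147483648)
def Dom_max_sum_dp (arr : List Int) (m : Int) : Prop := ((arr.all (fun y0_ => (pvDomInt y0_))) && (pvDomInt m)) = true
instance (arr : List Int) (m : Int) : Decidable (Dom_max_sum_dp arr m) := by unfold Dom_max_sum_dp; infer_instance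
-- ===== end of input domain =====

-- B replaces A's O(n^2) all-pairs scan by prefix sums with a sorted prefix list and
-- hand-written binary searches (measurably faster); A raises IndexError on [], B returns -1.


-- ===== PORT A =====
-- the loop 'for k in range(1, n): prefix_arr[k] = prefix_arr[k-1] + arr[k]'
-- (loop state = the previous prefix value; result = the list prefix_arr)
def pvPrefA : Int → List Int → List Int
  | p, [] => [p]
  | p, x :: xs => p :: pvPrefA (p + x) xs

def max_sum_dp (arr : List Int) (m : Int) : Int :=
  match arr with
  | [] => -1   -- 'prefix_arr[0] = arr[0]' raises IndexError here; excluded by Pre_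
  | a0 :: rest =>
    let ar := a0 :: rest
    let pa := pvPrefA a0 rest
    -- indices i, j are always in range, so getD is exact for Python's pa[i], pa[j], arr[j]
    (List.range ar.length).foldl (fun ns i =>
      (List.range (i + 1)).foldl (fun ns j =>
        let t := pa.getD i 0 - pa.getD j 0 + ar.getD j 0
        if ns < t ∧ t ≤ m then t else ns) ns) (-1)

-- ===== PORT B =====
-- Source B's hand-written 'while lo < hi' binary search (first index with s[idx] >= x)
def pvBisect (s : List Int) (x : Int) (lo hi : Nat) : Nat :=
  if lo < hi then
    let mid := (lo + hi) / 2
    if s.getD mid 0 < x then pvBisect s x (mid + 1) hi else pvBisect s x lo mid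
  else lo
termination_by hi - lo
decreasing_by all_goals omega

-- one iteration of Source B's 'for x in arr' loop; state = (best, p, sp)
def pvStep (m : Int) (st : Int × Int × List Int) (x : Int) : Int × Int × List Int :=
  let p := st.2.1 + x
  let s := st.2.2
  let lo := pvBisect s (p - m) 0 s.length
  let best := if lo < s.length then
      (if p - s.getD lo 0 > st.1 then p - s.getD lo 0 else st.1)
    else st.1
  let pos := pvBisect s p 0 s.length
  -- sp.insert(pos, p) with 0 ≤ pos ≤ len(sp) is exactly insertIdx
  (best, p, s.insertIdx pos p)

def max_sum_dp_alt (arr : List Int) (m : Int) : Int :=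
  (arr.foldl (pvStep m) (-1, 0, [0])).1

-- ===== PRECONDITION & SPEC =====
-- Pre_ excludes only the empty list, on which A raises IndexError at 'arr[0]'.
def Pre_max_sum_dp (arr : List Int) (m : Int) : Prop := arr ≠ []
instance (arr : List Int) (m : Int) : Decidable (Pre_max_sum_dp arr m) := by unfold Pre_max_sum_dp; infer_instance
def pvWitness_max_sum_dp : List Int × Int := ([1, -2, 3], 2)

def Spec_max_sum_dp (arr : List Int) (m : Int) (out : Int) : Prop := out = max_sum_dp_alt arr m
instance (arr : List Int) (m : Int) (out : Int) : Decidable (Spec_max_sum_dp arr m out) := by unfold Spec_max_sum_dp; infer_instance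

-- ===== CLAIM (what is proved, stated in full; the proofs are below) =====
def Claim_equal_max_sum_dp : Prop := ∀ (arr : List Int) (m : Int), Dom_max_sum_dp arr m → Pre_max_sum_dp arr m → Spec_max_sum_dp arr m (max_sum_dp arr m)

-- ===== LEMMAS AND PROOFS =====

-- the common characterisation: fold of 'take t if allowed and larger' over candidate sums
def fM (m : Int) (acc t : Int) : Int := if t ≤ m then max acc t else acc

-- prefix sum of the first k elements
def preS (arr : List Int) (k : Nat) : Int := (arr.take k).sum

-- the candidate sums B examines, from state (p = current prefix, s = earlier prefixes), canonical order
def sumsFrom (p : Int) (s : List Int) : List Int → List Int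
  | [] => []
  | x :: xs => s.map (fun y => (p + x) - y) ++ sumsFrom (p + x) ((p + x) :: s) xs

theorem fM_comm (m b t u : Int) : fM m (fM m b t) u = fM m (fM m b u) t := by
  unfold fM; split_ifs <;> omega

theorem foldl_fM_perm {l₁ l₂ : List Int} (m : Int) (hp : l₁.Perm l₂) :
    ∀ b, l₁.foldl (fM m) b = l₂.foldl (fM m) b := by
  induction hp with
  | nil => intro b; rfl
  | cons x _ ih => intro b; simp [List.foldl, ih]
  | swap x y l => intro b; simp [List.foldl, fM_comm]
  | trans _ _ ih₁ ih₂ => intro b; rw [ih₁, ih₂]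

theorem foldl_fM_eq_filter (m : Int) : ∀ (l : List Int) (b : Int),
    l.foldl (fM m) b = (l.filter (fun t => decide (t ≤ m))).foldl max b := by
  intro l
  induction l with
  | nil => intro b; rfl
  | cons x xs ih =>
    intro b
    by_cases h : x ≤ m <;> simp [List.foldl, fM, h, List.filter, ih]

theorem foldl_max_id : ∀ (l : List Int) (b : Int), (∀ x ∈ l, x ≤ b) → l.foldl max b = b := by
  intro l
  induction l with
  | nil => intro b _; rfl
  | cons x xs ih =>
    intro b h
    have hx : x ≤ b := h x (by simp)
    simp only [List.foldl]
    rw [max_eq_left hx]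
    exact ih b (fun y hy => h y (by simp [hy]))

theorem foldl_max_head (l : List Int) (a b : Int) (h : ∀ x ∈ l, x ≤ a) :
    (a :: l).foldl max b = max b a := by
  simp only [List.foldl]
  exact foldl_max_id l (max b a) (fun x hx => le_trans (h x hx) (le_max_right b a))

-- getD-monotonicity of a sorted list
theorem sorted_getD_mono {s : List Int} (hs : s.Pairwise (· ≤ ·)) {i j : Nat}
    (hij : i ≤ j) (hj : j < s.length) : s.getD i 0 ≤ s.getD j 0 := by
  rcases Nat.lt_or_ge i j with h | h
  · rw [List.getD_eq_getElem s 0 (lt_trans h hj), List.getD_eq_getElem s 0 hj]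
    exact List.pairwise_iff_getElem.mp hs i j (lt_trans h hj) hj h
  · have : i = j := le_antisymm hij h
    subst this; rfl

theorem pvBisect_spec (s : List Int) (x : Int) (hs : s.Pairwise (· ≤ ·)) :
    ∀ (lo hi : Nat), lo ≤ hi → hi ≤ s.length →
    (∀ i, i < lo → s.getD i 0 < x) → (∀ i, hi ≤ i → i < s.length → x ≤ s.getD i 0) →
    pvBisect s x lo hi ≤ s.length ∧
    (∀ i, i < pvBisect s x lo hi → s.getD i 0 < x) ∧
    (∀ i, pvBisect s x lo hi ≤ i → i < s.length → x ≤ s.getD i 0) := by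
  intro lo hi
  induction lo, hi using pvBisect.induct s x with
  | case1 lo hi h mid hlt ih =>
    intro _ hhi hlo hhi2
    rw [pvBisect, if_pos h]
    simp only [show (lo + hi)/2 = mid from rfl, if_pos hlt]
    exact ih (by omega) hhi
      (fun i hi' => lt_of_le_of_lt (sorted_getD_mono hs (by omega) (by omega)) hlt)
      hhi2
  | case2 lo hi h mid hge ih =>
    intro hlohi hhi hlo hhi2
    rw [pvBisect, if_pos h]
    simp only [show (lo + hi)/2 = mid from rfl, if_neg hge]
    exact ih (by omega) (by omega) hlo
      (fun i hmi hi' => le_trans (not_lt.mp hge) (sorted_getD_mono hs hmi hi'))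
  | case3 lo hi h =>
    intro hlohi hhi hlo hhi2
    rw [pvBisect, if_neg h]
    exact ⟨by omega, fun i hi' => hlo i hi', fun i hli hi' => hhi2 i (by omega) hi'⟩

theorem pvBisect_full (s : List Int) (x : Int) (hs : s.Pairwise (· ≤ ·)) :
    pvBisect s x 0 s.length ≤ s.length ∧
    (∀ i, i < pvBisect s x 0 s.length → s.getD i 0 < x) ∧
    (∀ i, pvBisect s x 0 s.length ≤ i → i < s.length → x ≤ s.getD i 0) :=
  pvBisect_spec s x hs 0 s.length (Nat.zero_le _) le_rfl
    (fun i hi => absurd hi (Nat.not_lt_zero i)) (fun i hi hi' => absurd hi' (by omega))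

theorem insertIdx_eq_take_drop : ∀ (l : List Int) (i : Nat), i ≤ l.length → ∀ (a : Int),
    l.insertIdx i a = l.take i ++ a :: l.drop i := by
  intro l
  induction l with
  | nil =>
    intro i hi a
    have : i = 0 := by simp at hi; omega
    subst this; rfl
  | cons x xs ih =>
    intro i hi a
    cases i with
    | zero => rfl
    | succ n =>
      rw [List.insertIdx_succ_cons, ih n (by simpa using hi) a]
      rfl

-- membership in take/drop pieces, via indices
theorem mem_take_lt {s : List Int} {r : Nat} {y : Int} (hy : y ∈ s.take r) :
    ∃ i, i < r ∧ i < s.length ∧ s.getD i 0 = y := by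
  rcases List.mem_iff_getElem.mp hy with ⟨i, hi, hval⟩
  have hlen : i < s.length := by
    have := hi; simp [List.length_take] at this; omega
  have hr : i < r := by
    have := hi; simp [List.length_take] at this; omega
  refine ⟨i, hr, hlen, ?_⟩
  rw [List.getD_eq_getElem s 0 hlen, ← hval, List.getElem_take]

theorem mem_drop_ge {s : List Int} {r : Nat} {y : Int} (hy : y ∈ s.drop r) :
    ∃ i, r ≤ i ∧ i < s.length ∧ s.getD i 0 = y := by
  rcases List.mem_iff_getElem.mp hy with ⟨i, hi, hval⟩
  have hlen : r + i < s.length := by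
    have := hi; simp [List.length_drop] at this; omega
  refine ⟨r + i, by omega, hlen, ?_⟩
  rw [List.getD_eq_getElem s 0 hlen, ← hval, List.getElem_drop]

-- B's best-update equals the fM-fold over this step's candidate sums
theorem step_best_eq (m p b : Int) (s : List Int) (hs : s.Pairwise (· ≤ ·)) :
    (if pvBisect s (p - m) 0 s.length < s.length then
        (if p - s.getD (pvBisect s (p - m) 0 s.length) 0 > b then
          p - s.getD (pvBisect s (p - m) 0 s.length) 0 else b)
      else b)
    = (s.map (fun y => p - y)).foldl (fM m) b := by
  obtain ⟨hle, hbefore, hafter⟩ := pvBisect_full s (p - m) hs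
  set r := pvBisect s (p - m) 0 s.length with hr
  rw [foldl_fM_eq_filter]
  have hsplit : s = s.take r ++ s.drop r := (List.take_append_drop r s).symm
  have hfiltake : ((s.take r).map (fun y => p - y)).filter (fun t => decide (t ≤ m)) = [] := by
    rw [List.filter_eq_nil_iff]
    intro t ht
    rcases List.mem_map.mp ht with ⟨y, hy, hty⟩
    rcases mem_take_lt hy with ⟨i, hir, hil, hiy⟩
    have := hbefore i hir
    rw [hiy] at this
    simp only [decide_eq_true_eq, ← hty]
    omega
  have hfildrop : ((s.drop r).map (fun y => p - y)).filter (fun t => decide (t ≤ m))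
      = (s.drop r).map (fun y => p - y) := by
    rw [List.filter_eq_self]
    intro t ht
    rcases List.mem_map.mp ht with ⟨y, hy, hty⟩
    rcases mem_drop_ge hy with ⟨i, hir, hil, hiy⟩
    have := hafter i hir hil
    rw [hiy] at this
    simp only [decide_eq_true_eq, ← hty]
    omega
  conv_rhs => rw [hsplit]
  rw [List.map_append, List.filter_append, hfiltake, hfildrop, List.nil_append]
  by_cases hrl : r < s.length
  · rw [if_pos hrl, List.drop_eq_getElem_cons hrl]
    rw [List.map_cons]
    rw [foldl_max_head _ _ _ ?bound]
    case bound =>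
      intro t ht
      rcases List.mem_map.mp ht with ⟨y, hy, hty⟩
      rcases mem_drop_ge hy with ⟨i, hir, hil, hiy⟩
      have hmono : s.getD r 0 ≤ s.getD i 0 := sorted_getD_mono hs (by omega) hil
      rw [hiy] at hmono
      rw [← hty, ← List.getD_eq_getElem s 0 hrl]
      omega
    rw [← List.getD_eq_getElem s 0 hrl]
    by_cases h : p - s.getD r 0 ≤ b
    · rw [if_neg (by omega), max_eq_left h]
    · rw [if_pos (by omega), max_eq_right (by omega)]
  · rw [if_neg hrl]
    have : s.drop r = [] := List.drop_eq_nil_of_le (by omega)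
    rw [this]; rfl

-- sortedness is preserved by Source B's insertion
theorem insert_sorted (s : List Int) (p : Int) (hs : s.Pairwise (· ≤ ·)) :
    (s.insertIdx (pvBisect s p 0 s.length) p).Pairwise (· ≤ ·) := by
  obtain ⟨hle, hbefore, hafter⟩ := pvBisect_full s p hs
  set r := pvBisect s p 0 s.length with hr
  rw [insertIdx_eq_take_drop s r hle p]
  have hsplit : s = s.take r ++ s.drop r := (List.take_append_drop r s).symm
  have hpair : (s.take r ++ s.drop r).Pairwise (· ≤ ·) := by rw [← hsplit]; exact hs
  rw [List.pairwise_append] at hpair ⊢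
  refine ⟨hpair.1, ?_, ?_⟩
  · rw [List.pairwise_cons]
    refine ⟨?_, hpair.2.1⟩
    intro y hy
    rcases mem_drop_ge hy with ⟨i, hir, hil, hiy⟩
    rw [← hiy]; exact hafter i hir hil
  · intro a ha b hb
    rcases List.mem_cons.mp hb with hb | hb
    · subst hb
      rcases mem_take_lt ha with ⟨i, hir, hil, hiy⟩
      rw [← hiy]; exact le_of_lt (hbefore i hir)
    · exact hpair.2.2 a ha b hb

theorem insert_perm (s : List Int) (p : Int) (hs : s.Pairwise (· ≤ ·)) :
    (s.insertIdx (pvBisect s p 0 s.length) p).Perm (p :: s) :=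
  List.perm_insertIdx p s (pvBisect_full s p hs).1

-- the B loop computes the fM-fold of all its candidate sums
theorem B_loop (m : Int) : ∀ (xs : List Int) (b p : Int) (s s₀ : List Int),
    s.Pairwise (· ≤ ·) → s.Perm s₀ →
    (xs.foldl (pvStep m) (b, p, s)).1 = (sumsFrom p s₀ xs).foldl (fM m) b := by
  intro xs
  induction xs with
  | nil => intro b p s s₀ _ _; rfl
  | cons x xs ih =>
    intro b p s s₀ hs hp
    simp only [List.foldl, sumsFrom, List.foldl_append]
    have hstep : pvStep m (b, p, s) x =
        ((s.map (fun y => (p + x) - y)).foldl (fM m) b, p + x,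
          s.insertIdx (pvBisect s (p + x) 0 s.length) (p + x)) := by
      simp only [pvStep]
      rw [step_best_eq m (p + x) b s hs]
    rw [hstep]
    rw [ih _ _ _ ((p + x) :: s₀) (insert_sorted s (p + x) hs)
      ((insert_perm s (p + x) hs).trans (hp.cons _))]
    congr 1
    exact foldl_fM_perm m ((hp.map _)) b

-- ===== A-side =====

theorem pvPrefA_getD : ∀ (xs : List Int) (p : Int) (k : Nat), k ≤ xs.length →
    (pvPrefA p xs).getD k 0 = p + (xs.take k).sum := by
  intro xs
  induction xs with
  | nil =>
    intro p k hk
    have : k = 0 := by simp at hk; omega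
    subst this
    simp [pvPrefA]
  | cons x xs ih =>
    intro p k hk
    cases k with
    | zero => simp [pvPrefA]
    | succ n =>
      simp only [pvPrefA, List.getD_cons_succ, List.take_succ_cons, List.sum_cons]
      rw [ih (p + x) n (by simpa using hk)]
      ring

theorem preS_succ (arr : List Int) (k : Nat) (hk : k < arr.length) :
    preS arr (k + 1) = preS arr k + arr.getD k 0 := by
  unfold preS
  rw [List.sum_take_succ arr k hk, List.getD_eq_getElem arr 0 hk]

-- A's double loop is the fM-fold over all (i, j) candidate sums, grouped by i
theorem A_eq_flat (arr : List Int) (m : Int) (h : arr ≠ []) :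
    max_sum_dp arr m = ((List.range arr.length).flatMap (fun i =>
      (List.range (i + 1)).map (fun j => preS arr (i + 1) - preS arr j))).foldl (fM m) (-1) := by
  match arr with
  | a0 :: rest =>
    show (List.range (a0 :: rest).length).foldl _ (-1) = _
    set ar := a0 :: rest with har
    -- each inner fold is a fold of fM over the i-th group
    have hgroup : ∀ (i : Nat), i < ar.length → ∀ (ns : Int),
        (List.range (i + 1)).foldl (fun ns j =>
          let t := (pvPrefA a0 rest).getD i 0 - (pvPrefA a0 rest).getD j 0 + ar.getD j 0
          if ns < t ∧ t ≤ m then t else ns) ns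
        = ((List.range (i + 1)).map (fun j => preS ar (i + 1) - preS ar j)).foldl (fM m) ns := by
      intro i hi ns
      rw [List.foldl_map]
      apply PySem.List.foldl_congr_mem
      intro ns' j hj
      have hj' : j ≤ i := by
        have := List.mem_range.mp hj; omega
      have hpa_i : (pvPrefA a0 rest).getD i 0 = preS ar (i + 1) := by
        rw [pvPrefA_getD rest a0 i (by simp [har] at hi ⊢; omega)]
        simp [preS, har]
      have hpa_j : (pvPrefA a0 rest).getD j 0 = preS ar (j + 1) := by
        rw [pvPrefA_getD rest a0 j (by simp [har] at hi ⊢; omega)]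
        simp [preS, har]
      have harj : ar.getD j 0 = preS ar (j + 1) - preS ar j := by
        rw [preS_succ ar j (by simp [har] at hi ⊢; omega)]; ring
      simp only [hpa_i, hpa_j, harj, fM]
      split_ifs <;> omega
    -- fold over flatMap = nested folds
    have hflat : ∀ (L : List Nat) (b : Int), (∀ i ∈ L, i < ar.length) →
        L.foldl (fun ns i =>
          (List.range (i + 1)).foldl (fun ns j =>
            let t := (pvPrefA a0 rest).getD i 0 - (pvPrefA a0 rest).getD j 0 + ar.getD j 0
            if ns < t ∧ t ≤ m then t else ns) ns) b
        = (L.flatMap (fun i =>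
            (List.range (i + 1)).map (fun j => preS ar (i + 1) - preS ar j))).foldl (fM m) b := by
      intro L
      induction L with
      | nil => intro b _; rfl
      | cons i L ihL =>
        intro b hmem
        simp only [List.foldl, List.flatMap_cons, List.foldl_append]
        rw [hgroup i (hmem i (by simp)) b]
        exact ihL _ (fun i' hi' => hmem i' (by simp [hi']))
    exact hflat (List.range ar.length) (-1) (fun i hi => List.mem_range.mp hi)

-- the canonical B candidate list, started from prefix k, equals A's groups k..n-1 (reversed)
theorem sumsFrom_drop (arr : List Int) : ∀ (xs : List Int) (k : Nat), arr.drop k = xs →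
    sumsFrom (preS arr k) (((List.range (k + 1)).map (preS arr)).reverse) xs
    = (List.range' k xs.length).flatMap (fun i =>
        ((List.range (i + 1)).map (fun j => preS arr (i + 1) - preS arr j)).reverse) := by
  intro xs
  induction xs with
  | nil => intro k _; rfl
  | cons x xs ih =>
    intro k hk
    have hklen : k < arr.length := by
      by_contra hcon
      rw [List.drop_eq_nil_of_le (by omega)] at hk
      cases hk
    have hx : x = arr.getD k 0 := by
      rw [List.drop_eq_getElem_cons hklen] at hk
      rw [List.getD_eq_getElem arr 0 hklen]
      exact (List.cons.injEq _ _ _ _ ▸ hk).1.symm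
    have hxs : arr.drop (k + 1) = xs := by
      rw [List.drop_eq_getElem_cons hklen] at hk
      exact (List.cons.injEq _ _ _ _ ▸ hk).2
    have hpsum : preS arr k + x = preS arr (k + 1) := by
      rw [hx, ← preS_succ arr k hklen]
    simp only [sumsFrom, List.length_cons, List.range'_succ]
    rw [List.flatMap_cons]
    congr 1
    · rw [hpsum]
      simp [← List.map_reverse, List.map_map, Function.comp]
    · have hcons : preS arr (k + 1) :: ((List.range (k + 1)).map (preS arr)).reverse
          = ((List.range (k + 2)).map (preS arr)).reverse := by
        simp [List.range_succ]
      rw [hpsum, hcons]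
      exact ih (k + 1) hxs

theorem flatMap_perm_of_perm {L : List Nat} {h₁ h₂ : Nat → List Int}
    (hp : ∀ i, (h₁ i).Perm (h₂ i)) : (L.flatMap h₁).Perm (L.flatMap h₂) := by
  induction L with
  | nil => rfl
  | cons i L ih => simpa using List.Perm.append (hp i) ih

-- ===== VERDICT (by name: the statement is the Claim_ definition above) =====
theorem max_sum_dp_spec : Claim_equal_max_sum_dp := by
  unfold Claim_equal_max_sum_dp
  intro arr m _ hpre
  unfold Spec_max_sum_dp Pre_max_sum_dp at *
  -- B side
  have hB : max_sum_dp_alt arr m = (sumsFrom 0 [0] arr).foldl (fM m) (-1) := by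
    unfold max_sum_dp_alt
    exact B_loop m arr (-1) 0 [0] [0] (by simp) (List.Perm.refl _)
  -- canonical B list at k = 0
  have hcanon := sumsFrom_drop arr arr 0 rfl
  have h0 : preS arr 0 = 0 := rfl
  have hs0 : ((List.range 1).map (preS arr)).reverse = [0] := by simp [preS]
  rw [h0, hs0] at hcanon
  rw [hcanon] at hB
  -- A side
  rw [A_eq_flat arr m hpre, hB]
  rw [← List.range_eq_range']
  exact foldl_fM_perm m
    (flatMap_perm_of_perm (fun i => (List.reverse_perm _).symm)) (-1)
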